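-- pv_equiv track=rewrite | github.com/Syler1984/seismo-ml-phase-picker | utils/seisan_tools.py | order_stations
-- ===== SOURCE A (Python) =====
-- def order_stations(stations, order):
--
--     ordered_list = []
--     for station_group in stations:
--
--         ordered_group = []
--         for channel in order:
--             for station in station_group:
--
--                 if station[1][-1] == channel:
--                     ordered_group.append(station)
--
--         if len(ordered_group) == len(order):
--             ordered_list.append(ordered_group)
--
--     return ordered_list
-- ===== SOURCE B (Python) =====
-- def order_stations(stations, order):
--     def reorder(station_group):
--         index = {}
--         for station in station_group:
--             index.setdefault(station[1][-1], []).append(station)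
--         return [station for channel in order for station in index.get(channel, [])]
--     return [group for group in map(reorder, stations) if len(group) == len(order)]
-- ===== Notes on version B (the rewrite author's own statement) =====
-- stated objective: faster
-- what changed: Replaces the nested order-by-stations rescan with a per-group dict index (channel code -> stations) built in one pass plus a comprehension over order, and expresses the outer loop as map+filter instead of an accumulator loop.
-- outside the precondition, e.g. on order_stations([[['x']]], []): A returns [[]], B raises IndexError; on order_stations([[['a', '']]], []): A returns [[]], B raises IndexError
import Mathlib
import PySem

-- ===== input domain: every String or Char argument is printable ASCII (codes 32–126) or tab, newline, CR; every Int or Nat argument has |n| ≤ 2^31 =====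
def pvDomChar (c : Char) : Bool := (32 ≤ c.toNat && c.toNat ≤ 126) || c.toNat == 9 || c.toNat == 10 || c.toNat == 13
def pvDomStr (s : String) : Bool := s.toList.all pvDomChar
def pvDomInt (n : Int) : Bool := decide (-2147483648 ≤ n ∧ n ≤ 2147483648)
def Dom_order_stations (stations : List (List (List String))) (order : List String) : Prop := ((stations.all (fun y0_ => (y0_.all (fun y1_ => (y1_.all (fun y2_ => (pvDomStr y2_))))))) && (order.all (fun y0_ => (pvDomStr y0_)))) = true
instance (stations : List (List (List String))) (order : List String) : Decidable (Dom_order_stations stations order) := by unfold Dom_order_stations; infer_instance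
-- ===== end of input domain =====

-- B replaces A's nested order×group rescan with a per-group dict index (channel code → stations)
-- plus one pass over order, and writes the outer loop as map+filter; asymptotically faster.

-- ===== PORT A =====
-- station[1][-1] as both Pythons compute it ("" is an arbitrary total default;
-- Pre_ excludes inputs where Python would raise IndexError here)
def osKey (station : List String) : String :=
  match PySem.List.pyGet? station 1 with
  | some s =>
    match PySem.Str.pyGet? s (-1) with
    | some c => String.ofList [c]
    | none => ""
  | none => ""

def order_stations (stations : List (List (List String))) (order : List String) : List (List (List String)) :=
  stations.foldl (fun ordered_list station_group =>
    let ordered_group :=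
      order.foldl (fun og channel =>
        station_group.foldl (fun og station =>
          if osKey station == channel then og ++ [station] else og) og) []
    if ordered_group.length = order.length then ordered_list ++ [ordered_group] else ordered_list) []

-- ===== PORT B =====
def osReorder (order : List String) (station_group : List (List String)) : List (List String) :=
  let index : PySem.Dict String (List (List String)) :=
    station_group.foldl (fun d station => d.modify (osKey station) [] (· ++ [station])) PySem.Dict.empty
  order.flatMap (fun channel => index.getD channel [])

def order_stations_alt (stations : List (List (List String))) (order : List String) : List (List (List String)) :=
  (stations.map (osReorder order)).filter (fun group => group.length == order.length)

-- ===== PRECONDITION & SPEC =====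
-- Pre_ excludes station entries with fewer than two fields or an empty second field: on those Python A
-- raises IndexError whenever order is non-empty, and B raises on them even when order is empty
-- (B's index build evaluates station[1][-1] for every station; A returns trivially there — see cites).
def Pre_order_stations (stations : List (List (List String))) (order : List String) : Prop :=
  ∀ g ∈ stations, ∀ st ∈ g, 2 ≤ st.length ∧ st.getD 1 "" ≠ ""
instance (stations : List (List (List String))) (order : List String) : Decidable (Pre_order_stations stations order) := by unfold Pre_order_stations; infer_instance

def pvWitness_order_stations : List (List (List String)) × List String :=
  ([[["S1", "HHZ"], ["S2", "HHN"]], [["S3", "HHZ"]]], ["Z", "N"])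

def Spec_order_stations (stations : List (List (List String))) (order : List String) (out : List (List (List String))) : Prop := out = order_stations_alt stations order
instance (stations : List (List (List String))) (order : List String) (out : List (List (List String))) : Decidable (Spec_order_stations stations order out) := by unfold Spec_order_stations; infer_instance

-- ===== CLAIM (what is proved, stated in full; the proofs are below) =====
def Claim_equal_order_stations : Prop := ∀ (stations : List (List (List String))) (order : List String), Dom_order_stations stations order → Pre_order_stations stations order → Spec_order_stations stations order (order_stations stations order)

-- ===== LEMMAS AND PROOFS =====

-- B's per-group index looked up at a channel is exactly the stations of the group with that key.
lemma osIndex_getD (group : List (List String)) (ch : String) :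
    (group.foldl (fun d station => d.modify (osKey station) [] (· ++ [station]))
      (PySem.Dict.empty : PySem.Dict String (List (List String)))).getD ch []
      = group.filter (fun st => osKey st == ch) := by
  have h : group.foldl (fun d station => d.modify (osKey station) [] (· ++ [station]))
      (PySem.Dict.empty : PySem.Dict String (List (List String)))
      = (group.map (fun st => (osKey st, st))).foldl
          (fun d p => d.modify p.1 [] (· ++ [p.2])) PySem.Dict.empty := by
    rw [List.foldl_map]
  rw [h, PySem.Dict.getD_foldl_modify_append]
  simp [List.filter_map, List.map_map, Function.comp_def]

-- A's inner double loop over a group equals B's reorder of that group.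
lemma osInner_eq (group : List (List String)) (order : List String) :
    order.foldl (fun og channel =>
      group.foldl (fun og station =>
        if osKey station == channel then og ++ [station] else og) og) []
    = osReorder order group := by
  unfold osReorder
  have h : ∀ og : List (List String),
      order.foldl (fun og channel =>
        group.foldl (fun og station =>
          if osKey station == channel then og ++ [station] else og) og) og
      = order.foldl (fun og channel =>
          og ++ (group.foldl (fun d station => d.modify (osKey station) [] (· ++ [station]))
            (PySem.Dict.empty : PySem.Dict String (List (List String)))).getD channel []) og := by
    intro og
    apply PySem.List.foldl_congr_mem
    intro acc' ch _
    rw [osIndex_getD, PySem.List.foldl_append_if_eq_filter]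
  rw [h, PySem.List.foldl_append_eq_flatMap]
  simp only [osIndex_getD, List.nil_append]

-- ===== VERDICT (by name: the statement is the Claim_ definition above) =====
theorem order_stations_spec : Claim_equal_order_stations := by
  intro stations order _ _
  unfold Spec_order_stations order_stations order_stations_alt
  calc stations.foldl (fun ordered_list station_group =>
        let ordered_group :=
          order.foldl (fun og channel =>
            station_group.foldl (fun og station =>
              if osKey station == channel then og ++ [station] else og) og) []
        if ordered_group.length = order.length then ordered_list ++ [ordered_group] else ordered_list) []
      = stations.foldl (fun ordered_list station_group =>
          if (osReorder order station_group).length = order.length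
          then ordered_list ++ [osReorder order station_group] else ordered_list) [] := by
        apply PySem.List.foldl_congr_mem
        intro acc g _
        simp only [osInner_eq]
    _ = (stations.map (osReorder order)).filter (fun group => group.length == order.length) := by
        have hm : ((stations.map (osReorder order)).foldl (fun ordered_list g =>
              if g.length = order.length then ordered_list ++ [g] else ordered_list)
              ([] : List (List (List String))))
            = stations.foldl (fun ordered_list station_group =>
              if (osReorder order station_group).length = order.length
              then ordered_list ++ [osReorder order station_group] else ordered_list) [] :=
          List.foldl_map
        rw [← hm, PySem.List.foldl_append_ite_eq_filter]
        simp only [List.nil_append]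
        congr 1
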